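-- pv_equiv track=rewrite | github.com/AdamAndrei/algorithms-and-programming-course | lab 3/ALARM_CLOCK/Better_Menu.py | subsequence_eleven
-- ===== SOURCE A (Python) =====
-- def two_base(a):
--     m = 0
--     p = 1
--     while a > 0:
--         r = a % 2
--         m = m + (r * p)
--         p = p * 10
--         a = a // 2
--     return m
--
-- def bits(number):
--     a = two_base(number)
--     number_of_one = 0
--     while a > 0:
--         ld = a % 10
--         if ld == 1:
--             number_of_one += 1
--         a = a // 10
--     return number_of_one
--
-- def subsequence_eleven(list):
--     beststart = 0
--     bestcount = 0
--     curentstart = 0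
--     curentcount = 0
--
--     for index in range(len(list) - 1):
--         if bits(list[index]) == bits(list[index + 1]):
--             curentcount += 1
--             if curentcount == 1:
--                 curentstart = index
--             if curentcount > bestcount:
--                 bestcount = curentcount
--                 beststart = curentstart
--         else:
--             curentcount = 0
--     return list[beststart: beststart + bestcount + 1]
-- ===== SOURCE B (Python) =====
-- def two_base(a):
--     m = 0
--     p = 1
--     while a > 0:
--         r = a % 2
--         m = m + (r * p)
--         p = p * 10
--         a = a // 2
--     return m
--
-- def bits(number):
--     a = two_base(number)
--     number_of_one = 0
--     while a > 0:
--         ld = a % 10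
--         if ld == 1:
--             number_of_one += 1
--         a = a // 10
--     return number_of_one
--
-- def subsequence_eleven(list):
--     n = len(list)
--     if n == 0:
--         return []
--     pops = [bits(x) for x in list]
--     best_start = 0
--     best_len = 0
--     i = 0
--     while i < n:
--         j = i
--         while j + 1 < n and pops[j + 1] == pops[i]:
--             j += 1
--         if j - i + 1 > best_len:
--             best_start = i
--             best_len = j - i + 1
--         i = j + 1
--     return list[best_start: best_start + best_len]
-- ===== Notes on version B (the rewrite author's own statement) =====
-- stated objective: faster
-- what changed: B precomputes each element's popcount once into a list and scans maximal runs of equal popcount with a two-level index loop picking the earliest longest run, instead of A's single pass over adjacent pairs that recomputes both popcounts at every index and maintains current/best counters.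
import Mathlib
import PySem

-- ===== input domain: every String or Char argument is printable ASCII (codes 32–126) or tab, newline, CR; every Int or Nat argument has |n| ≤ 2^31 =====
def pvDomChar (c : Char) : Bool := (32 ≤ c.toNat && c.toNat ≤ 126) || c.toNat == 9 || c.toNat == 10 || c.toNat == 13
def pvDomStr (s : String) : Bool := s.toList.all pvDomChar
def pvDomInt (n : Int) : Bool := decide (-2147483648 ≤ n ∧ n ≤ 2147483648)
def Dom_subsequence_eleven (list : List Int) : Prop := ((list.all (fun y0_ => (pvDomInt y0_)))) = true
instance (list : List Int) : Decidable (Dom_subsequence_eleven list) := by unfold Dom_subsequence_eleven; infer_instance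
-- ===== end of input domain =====

-- B re-implements A by precomputing the popcount of every element once and scanning maximal
-- runs of equal popcount with a two-level index loop (alternative decomposition; same cost class).

-- ===== PORT A =====
-- while a > 0: m += (a % 2) * p; p *= 10; a //= 2
def two_base_go (a m p : Int) : Int :=
  if h : 0 < a then
    two_base_go (PySem.Int.floordiv a 2) (m + PySem.Int.mod a 2 * p) (p * 10)
  else m
termination_by a.toNat
decreasing_by
  simp only [PySem.Int.floordiv]
  rw [Int.fdiv_eq_ediv]
  omega

def two_base (a : Int) : Int := two_base_go a 0 1

-- while a > 0: if a % 10 == 1: number_of_one += 1; a //= 10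
def bits_go (a number_of_one : Int) : Int :=
  if h : 0 < a then
    bits_go (PySem.Int.floordiv a 10)
      (if PySem.Int.mod a 10 = 1 then number_of_one + 1 else number_of_one)
  else number_of_one
termination_by a.toNat
decreasing_by
  simp only [PySem.Int.floordiv]
  rw [Int.fdiv_eq_ediv]
  omega

def bits (number : Int) : Int := bits_go (two_base number) 0

def subsequence_eleven (list : List Int) : List Int :=
  let st :=
    (PySem.List.pyRange 0 ((list.length : Int) - 1) 1).foldl
      (fun (s : Int × Int × Int × Int) index =>
        let beststart := s.1; let bestcount := s.2.1
        let curentstart := s.2.2.1; let curentcount := s.2.2.2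
        if bits (PySem.List.pyGetD list index 0) = bits (PySem.List.pyGetD list (index + 1) 0) then
          let curentcount := curentcount + 1
          let curentstart := if curentcount = 1 then index else curentstart
          if curentcount > bestcount then (curentstart, curentcount, curentstart, curentcount)
          else (beststart, bestcount, curentstart, curentcount)
        else (beststart, bestcount, curentstart, 0))
      (0, 0, 0, 0)
  PySem.List.slice list (some st.1) (some (st.1 + st.2.1 + 1))

-- ===== PORT B =====
-- inner while: while j + 1 < n and pops[j + 1] == pops[i]: j += 1
-- (every index B forms is non-negative and in range, so List.getD is exact for pops[·])
def runEnd (pops : List Int) (i j : Nat) : Nat :=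
  if h : j + 1 < pops.length ∧ pops.getD (j + 1) 0 = pops.getD i 0 then
    runEnd pops i (j + 1)
  else j
termination_by pops.length - j

lemma le_runEnd (pops : List Int) (i j : Nat) : j ≤ runEnd pops i j := by
  fun_induction runEnd with
  | case1 j h ih => omega
  | case2 j h => omega

-- outer while over i, carrying (best_start, best_len)
def bScan (pops : List Int) (n i best_start best_len : Nat) : Nat × Nat :=
  if h : i < n then
    let j := runEnd pops i i
    if j - i + 1 > best_len then bScan pops n (j + 1) i (j - i + 1)
    else bScan pops n (j + 1) best_start best_len
  else (best_start, best_len)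
termination_by n - i
decreasing_by
  · have := le_runEnd pops i i; omega
  · have := le_runEnd pops i i; omega

def subsequence_eleven_alt (list : List Int) : List Int :=
  if list.length = 0 then []
  else
    let pops := list.map bits
    let r := bScan pops list.length 0 0 0
    PySem.List.slice list (some (r.1 : Int)) (some ((r.1 : Int) + (r.2 : Int)))

-- ===== PRECONDITION & SPEC =====
def Spec_subsequence_eleven (list : List Int) (out : List Int) : Prop := out = subsequence_eleven_alt list
instance (list : List Int) (out : List Int) : Decidable (Spec_subsequence_eleven list out) := by unfold Spec_subsequence_eleven; infer_instance

-- ===== CLAIM (what is proved, stated in full; the proofs are below) =====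
def Claim_equal_subsequence_eleven : Prop := ∀ (list : List Int), Dom_subsequence_eleven list → Spec_subsequence_eleven list (subsequence_eleven list)

-- ===== LEMMAS AND PROOFS =====

-- A's loop body, restated over the precomputed popcount list q with a natural index.
def aStep (q : List Int) (s : Int × Int × Int × Int) (k : Nat) : Int × Int × Int × Int :=
  let bs := s.1; let bc := s.2.1; let cs := s.2.2.1; let cc := s.2.2.2
  if q.getD k 0 = q.getD (k + 1) 0 then
    let cc' := cc + 1
    let cs' := if cc' = 1 then (k : Int) else cs
    if cc' > bc then (cs', cc', cs', cc') else (bs, bc, cs', cc')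
  else (bs, bc, cs, 0)

-- A's port computes its slice from an aStep-fold over the Nat indices 0..n-2
lemma portA_eq_fold (list : List Int) :
    subsequence_eleven list =
      (let st := (List.range' 0 (list.length - 1)).foldl (aStep (list.map bits)) (0, 0, 0, 0)
       PySem.List.slice list (some st.1) (some (st.1 + st.2.1 + 1))) := by
  unfold subsequence_eleven
  rw [PySem.List.pyRange_one, List.foldl_map]
  have hm : (((list.length : Int)) - 1 - 0).toNat = list.length - 1 := by omega
  rw [hm, List.range_eq_range']
  have hfold :
      (List.range' 0 (list.length - 1)).foldl
        (fun (s : Int × Int × Int × Int) (k : Nat) =>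
          let beststart := s.1; let bestcount := s.2.1
          let curentstart := s.2.2.1; let curentcount := s.2.2.2
          if bits (PySem.List.pyGetD list ((0 : Int) + (k : Int)) 0)
              = bits (PySem.List.pyGetD list ((0 : Int) + (k : Int) + 1) 0) then
            let curentcount := curentcount + 1
            let curentstart := if curentcount = 1 then ((0 : Int) + (k : Int)) else curentstart
            if curentcount > bestcount then (curentstart, curentcount, curentstart, curentcount)
            else (beststart, bestcount, curentstart, curentcount)
          else (beststart, bestcount, curentstart, 0))
        (0, 0, 0, 0)
      = (List.range' 0 (list.length - 1)).foldl (aStep (list.map bits)) (0, 0, 0, 0) := by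
    apply PySem.List.foldl_congr_mem
    intro acc k hk
    have hk' : k < list.length - 1 := by
      have := List.mem_range'.1 hk; omega
    have hk1 : k < list.length := by omega
    have hk2 : k + 1 < list.length := by omega
    have e0 : (0 : Int) + (k : Int) = ((k : Nat) : Int) := by ring
    have e1 : (0 : Int) + (k : Int) + 1 = (((k + 1 : Nat)) : Int) := by push_cast; ring
    rw [e0, e1] at *
    simp only [aStep, PySem.List.pyGetD_natCast]
    have g1 : list.getD k 0 = list[k] := List.getD_eq_getElem list 0 hk1
    have g2 : list.getD (k+1) 0 = list[k+1] := List.getD_eq_getElem list 0 hk2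
    have q1 : (list.map bits).getD k 0 = bits list[k] := by
      rw [List.getD_eq_getElem _ 0 (by simpa using hk1)]; simp
    have q2 : (list.map bits).getD (k+1) 0 = bits list[k+1] := by
      rw [List.getD_eq_getElem _ 0 (by simpa using hk2)]; simp
    rw [g1, g2, q1, q2]
  rw [hfold]

-- folding A's body over t consecutive "equal-popcount" indices starting at a run start (cc = 0)
lemma aFold_trues (q : List Int) (t s : Nat) (bs bc cs : Int) (hbc : 0 ≤ bc)
    (htrue : ∀ k, s ≤ k → k < s + t → q.getD k 0 = q.getD (k + 1) 0) :
    (List.range' s t).foldl (aStep q) (bs, bc, cs, 0) =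
      ((if (t : Int) > bc then (s : Int) else bs),
       (if (t : Int) > bc then (t : Int) else bc),
       (if t = 0 then cs else (s : Int)), (t : Int)) := by
  induction t with
  | zero => simp; omega
  | succ t ih =>
    have hcat : List.range' s (t+1) = List.range' s t ++ [s+t] := by
      simpa using (List.range'_concat : List.range' s (t+1) 1 = _)
    rw [hcat, List.foldl_append, ih (fun k h1 h2 => htrue k h1 (by omega))]
    have hlast : q.getD (s+t) 0 = q.getD (s+t+1) 0 := htrue _ (by omega) (by omega)
    simp only [List.foldl_cons, List.foldl_nil, aStep, hlast]
    push_cast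
    split_ifs <;> simp_all <;> omega

-- what the inner while loop computes: the end of the maximal run of pops[i] starting at i
lemma runEnd_spec (pops : List Int) (i j : Nat) (hij : i ≤ j) (hj : j < pops.length)
    (hall : ∀ k, i ≤ k → k ≤ j → pops.getD k 0 = pops.getD i 0) :
    i ≤ runEnd pops i j ∧ runEnd pops i j < pops.length ∧
      (∀ k, i ≤ k → k ≤ runEnd pops i j → pops.getD k 0 = pops.getD i 0) ∧
      ¬(runEnd pops i j + 1 < pops.length ∧
          pops.getD (runEnd pops i j + 1) 0 = pops.getD i 0) := by
  fun_induction runEnd with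
  | case1 j h ih =>
    exact ih (by omega) h.1 (fun k h1 h2 => by
      rcases Nat.lt_or_ge k (j+1) with hk | hk
      · exact hall k h1 (by omega)
      · have : k = j + 1 := by omega
        subst this; exact h.2)
  | case2 j h =>
    exact ⟨hij, hj, hall, h⟩

-- the heart: from any run start s, A's fold and B's run scan maintain related bests
lemma main_lemma (q : List Int) (fuel : Nat) :
    ∀ (s : Nat) (bs bc cs : Int) (bsB blB : Nat),
      q.length - s ≤ fuel → s < q.length →
      ((bs = (bsB : Int) ∧ bc + 1 = (blB : Int) ∧ 1 ≤ blB) ∨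
        (s = 0 ∧ bs = 0 ∧ bc = 0 ∧ bsB = 0 ∧ blB = 0)) →
      (((List.range' s (q.length - 1 - s)).foldl (aStep q) (bs, bc, cs, 0)).1
          = ((bScan q q.length s bsB blB).1 : Int) ∧
        ((List.range' s (q.length - 1 - s)).foldl (aStep q) (bs, bc, cs, 0)).2.1 + 1
          = ((bScan q q.length s bsB blB).2 : Int)) := by
  induction fuel with
  | zero => intro s _ _ _ _ _ hf hs _; omega
  | succ fuel ih =>
    intro s bs bc cs bsB blB hf hs hrel
    obtain ⟨hsj, hjn, hrun, hstop⟩ := runEnd_spec q s s le_rfl hs (fun k h1 h2 => by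
      have hk : k = s := by omega
      rw [hk])
    set j := runEnd q s s with hjdef
    have hbc0 : 0 ≤ bc := by rcases hrel with ⟨_, h2, h3⟩ | ⟨_, _, h2, _⟩ <;> omega
    have htr : ∀ k, s ≤ k → k < s + (j - s) → q.getD k 0 = q.getD (k + 1) 0 := by
      intro k h1 h2
      rw [hrun k h1 (by omega), hrun (k+1) (by omega) (by omega)]
    rw [bScan, dif_pos hs]
    simp only [← hjdef]
    by_cases hend : j + 1 = q.length
    · -- last run reaches the end of the list: no boundary index, B's recursive call stops
      have hA : q.length - 1 - s = j - s := by omega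
      rw [hA, aFold_trues q (j-s) s bs bc cs hbc0 htr]
      have hstopB : ∀ a b : Nat, bScan q q.length (j+1) a b = (a, b) := by
        intro a b; rw [bScan, dif_neg (by omega)]
      simp only [hstopB]
      rcases hrel with ⟨h1, h2, h3⟩ | ⟨h0, h1, h2, h3, h4⟩
      · split_ifs with c1 c2
        all_goals constructor
        all_goals simp
        all_goals omega
      · split_ifs with c1 c2
        all_goals constructor
        all_goals simp
        all_goals omega
    · -- a boundary index j follows the run; A resets its counter, both continue at j+1
      have hfalse : ¬ (q.getD j 0 = q.getD (j + 1) 0) := by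
        intro hEq
        exact hstop ⟨by omega, by rw [← hEq, hrun j hsj le_rfl]⟩
      have hdec : List.range' s (q.length - 1 - s) =
          (List.range' s (j - s) ++ [j]) ++ List.range' (j + 1) (q.length - 1 - (j + 1)) := by
        have h1 : List.range' s (j - s) ++ [s + (j - s)] = List.range' s (j - s + 1) := by
          simpa using (List.range'_concat : List.range' s (j - s + 1) 1 = _).symm
        have h2 : s + (j - s) = j := by omega
        rw [h2] at h1
        rw [h1]
        have h3 : s + 1 * (j - s + 1) = j + 1 := by omega
        have h4 := (List.range'_append (s := s) (m := j - s + 1)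
          (n := q.length - 1 - (j + 1)) (step := 1))
        rw [h3] at h4
        rw [h4]
        congr 1
        omega
      rw [hdec, List.foldl_append, List.foldl_append,
        aFold_trues q (j-s) s bs bc cs hbc0 htr]
      simp only [List.foldl_cons, List.foldl_nil, aStep, if_neg hfalse]
      by_cases hL : j - s + 1 > blB
      · rw [if_pos hL]
        refine ih (j+1) _ _ _ s (j - s + 1) (by omega) (by omega) (Or.inl ?_)
        rcases hrel with ⟨h1, h2, h3⟩ | ⟨h0, h1, h2, h3, h4⟩
        · have hc1 : ((j - s : Nat) : Int) > bc := by omega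
          rw [if_pos hc1, if_pos hc1]
          exact ⟨rfl, by omega, by omega⟩
        · subst h0; subst h1; subst h2
          split_ifs with c1 <;>
            exact ⟨by omega, by omega, by omega⟩
      · rw [if_neg hL]
        rcases hrel with ⟨h1, h2, h3⟩ | ⟨h0, h1, h2, h3, h4⟩
        · have hc1 : ¬ ((j - s : Nat) : Int) > bc := by omega
          rw [if_neg hc1, if_neg hc1]
          exact ih (j+1) _ _ _ bsB blB (by omega) (by omega) (Or.inl ⟨h1, h2, h3⟩)
        · exact absurd (by omega) hL

-- ===== VERDICT (by name: the statement is the Claim_ definition above) =====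
theorem subsequence_eleven_spec : Claim_equal_subsequence_eleven := by
  unfold Claim_equal_subsequence_eleven Spec_subsequence_eleven
  intro list _
  rw [portA_eq_fold]
  by_cases hnil : list.length = 0
  · have : list = [] := List.length_eq_zero_iff.1 hnil
    subst this
    simp [subsequence_eleven_alt, PySem.List.slice_toNat]
  · unfold subsequence_eleven_alt
    rw [if_neg hnil]
    have hlen : (list.map bits).length = list.length := List.length_map ..
    obtain ⟨e1, e2⟩ := main_lemma (list.map bits) list.length 0 0 0 0 0 0
      (by omega) (by omega) (Or.inr ⟨rfl, rfl, rfl, rfl, rfl⟩)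
    rw [hlen] at e1 e2
    have hr : (list.length - 1 - 0) = list.length - 1 := by omega
    rw [hr] at e1 e2
    simp only []
    rw [e1]
    have e3 : ((bScan (list.map bits) list.length 0 0 0).1 : Int)
        + ((List.range' 0 (list.length - 1)).foldl (aStep (list.map bits)) (0, 0, 0, 0)).2.1 + 1
        = ((bScan (list.map bits) list.length 0 0 0).1 : Int)
        + ((bScan (list.map bits) list.length 0 0 0).2 : Int) := by omega
    rw [e3]
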